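-- pv_equiv track=rewrite | github.com/tongyi00/github_trending_push | src/infrastructure/logging_config.py | _get_log_format
-- ===== SOURCE A (Python) =====
-- def _get_log_format(fmt: str) -> str:
--     """
--     获取日志格式，支持将Python logging格式转换为Loguru格式
--     """
--     if not fmt:
--         return "<green>{time:YYYY-MM-DD HH:mm:ss}</green> | <level>{level: <8}</level> | <cyan>{name}</cyan>:<cyan>{function}</cyan>:<cyan>{line}</cyan> - <level>{message}</level>"
--
--     # 如果包含 %，尝试进行简单的 logging format -> loguru format 映射
--     if '%' in fmt:
--         replacements = {
--             '%(asctime)s': '{time:YYYY-MM-DD HH:mm:ss}',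
--             '%(levelname)s': '{level}',
--             '%(level)s': '{level}',
--             '%(message)s': '{message}',
--             '%(name)s': '{name}',
--             '%(module)s': '{module}',
--             '%(funcName)s': '{function}',
--             '%(lineno)d': '{line}',
--             '%(lineno)s': '{line}',
--             '%(threadName)s': '{thread}',
--             '%(process)d': '{process}'
--         }
--
--         for py_fmt, loguru_fmt in replacements.items():
--             fmt = fmt.replace(py_fmt, loguru_fmt)
--
--     return fmt
-- ===== SOURCE B (Python) =====
-- _DEFAULT = "<green>{time:YYYY-MM-DD HH:mm:ss}</green> | <level>{level: <8}</level> | <cyan>{name}</cyan>:<cyan>{function}</cyan>:<cyan>{line}</cyan> - <level>{message}</level>"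
--
-- _TABLE = [
--     ('%(asctime)s', '{time:YYYY-MM-DD HH:mm:ss}'),
--     ('%(levelname)s', '{level}'),
--     ('%(level)s', '{level}'),
--     ('%(message)s', '{message}'),
--     ('%(name)s', '{name}'),
--     ('%(module)s', '{module}'),
--     ('%(funcName)s', '{function}'),
--     ('%(lineno)d', '{line}'),
--     ('%(lineno)s', '{line}'),
--     ('%(threadName)s', '{thread}'),
--     ('%(process)d', '{process}'),
-- ]
--
--
-- def _get_log_format(fmt: str) -> str:
--     """Single left-to-right pass: at each position emit the mapped loguru
--     token if a logging directive starts there, else copy the character."""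
--     if not fmt:
--         return _DEFAULT
--     out = []
--     i = 0
--     n = len(fmt)
--     while i < n:
--         for key, val in _TABLE:
--             if fmt.startswith(key, i):
--                 out.append(val)
--                 i += len(key)
--                 break
--         else:
--             out.append(fmt[i])
--             i += 1
--     return "".join(out)
-- ===== Notes on version B (the rewrite author's own statement) =====
-- stated objective: alternative
-- what changed: Replaces A's eleven sequential full-string str.replace passes by a single left-to-right scan that, at each position, emits the mapped loguru token for the first matching logging directive or copies the character; the percent-sign pre-check becomes unnecessary.
import Mathlib
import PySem

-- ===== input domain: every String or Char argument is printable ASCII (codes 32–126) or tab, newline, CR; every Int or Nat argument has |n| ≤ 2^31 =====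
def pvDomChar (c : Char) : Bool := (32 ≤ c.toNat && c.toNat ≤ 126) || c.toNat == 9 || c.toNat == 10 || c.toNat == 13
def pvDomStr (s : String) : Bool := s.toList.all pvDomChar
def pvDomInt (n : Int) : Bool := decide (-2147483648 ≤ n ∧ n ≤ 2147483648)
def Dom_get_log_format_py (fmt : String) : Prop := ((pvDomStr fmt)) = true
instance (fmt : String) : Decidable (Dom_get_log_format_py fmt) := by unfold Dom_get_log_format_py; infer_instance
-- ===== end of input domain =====

-- B replaces A's eleven sequential str.replace passes by one left-to-right table-driven scan (alternative decomposition, same results).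


-- A's default loguru format string returned for an empty fmt
def pvLoguruDefault : String := "<green>{time:YYYY-MM-DD HH:mm:ss}</green> | <level>{level: <8}</level> | <cyan>{name}</cyan>:<cyan>{function}</cyan>:<cyan>{line}</cyan> - <level>{message}</level>"

-- ===== PORT A =====
-- the `replacements` dict literal of A (distinct keys, insertion order)
def pvReplacements : PySem.Dict String String := PySem.Dict.mk
  [ ("%(asctime)s", "{time:YYYY-MM-DD HH:mm:ss}")
  , ("%(levelname)s", "{level}")
  , ("%(level)s", "{level}")
  , ("%(message)s", "{message}")
  , ("%(name)s", "{name}")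
  , ("%(module)s", "{module}")
  , ("%(funcName)s", "{function}")
  , ("%(lineno)d", "{line}")
  , ("%(lineno)s", "{line}")
  , ("%(threadName)s", "{thread}")
  , ("%(process)d", "{process}") ]

def get_log_format_py (fmt : String) : String :=
  if fmt = "" then pvLoguruDefault
  else if PySem.Str.isIn "%" fmt then
    -- for py_fmt, loguru_fmt in replacements.items(): fmt = fmt.replace(py_fmt, loguru_fmt)
    pvReplacements.items.foldl (fun f p => PySem.Str.replace f p.1 p.2) fmt
  else fmt

-- ===== PORT B =====
-- Source B's _TABLE, as (key, value) pairs of char lists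
def pvTable : List (List Char × List Char) :=
  [ ("%(asctime)s".toList, "{time:YYYY-MM-DD HH:mm:ss}".toList)
  , ("%(levelname)s".toList, "{level}".toList)
  , ("%(level)s".toList, "{level}".toList)
  , ("%(message)s".toList, "{message}".toList)
  , ("%(name)s".toList, "{name}".toList)
  , ("%(module)s".toList, "{module}".toList)
  , ("%(funcName)s".toList, "{function}".toList)
  , ("%(lineno)d".toList, "{line}".toList)
  , ("%(lineno)s".toList, "{line}".toList)
  , ("%(threadName)s".toList, "{thread}".toList)
  , ("%(process)d".toList, "{process}".toList) ]

-- termination fact for the scan: every table key is nonempty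
theorem pvTable_keys_ne : ∀ p ∈ pvTable, p.1 ≠ [] := by decide

-- Source B's while loop: at each position, first matching key's value, else copy the char
def pvScan : List Char → List Char
  | [] => []
  | c :: t =>
    match h : pvTable.find? (fun p => p.1.isPrefixOf (c :: t)) with
    | some p => p.2 ++ pvScan (List.drop p.1.length (c :: t))
    | none => c :: pvScan t
  termination_by s => s.length
  decreasing_by
    · have hm := List.mem_of_find?_eq_some h
      have hne : p.1 ≠ [] := pvTable_keys_ne _ hm
      have hpos : 0 < p.1.length := List.length_pos_of_ne_nil hne
      simp [List.length_drop]
      omega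
    · simp

-- Source B's _DEFAULT (same literal as A's)
def pvDefaultB : String := "<green>{time:YYYY-MM-DD HH:mm:ss}</green> | <level>{level: <8}</level> | <cyan>{name}</cyan>:<cyan>{function}</cyan>:<cyan>{line}</cyan> - <level>{message}</level>"

def get_log_format_py_alt (fmt : String) : String :=
  if fmt = "" then pvDefaultB
  else String.ofList (pvScan fmt.toList)

-- ===== PRECONDITION & SPEC =====
def Spec_get_log_format_py (fmt : String) (out : String) : Prop := out = get_log_format_py_alt fmt
instance (fmt : String) (out : String) : Decidable (Spec_get_log_format_py fmt out) := by unfold Spec_get_log_format_py; infer_instance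

-- ===== CLAIM (what is proved, stated in full; the proofs are below) =====
def Claim_equal_get_log_format_py : Prop := ∀ (fmt : String), Dom_get_log_format_py fmt → Spec_get_log_format_py fmt (get_log_format_py fmt)

-- ===== LEMMAS AND PROOFS =====

def pvRep (old new : List Char) : List Char → List Char
  | [] => []
  | c :: t =>
    if h : old.isPrefixOf (c :: t) ∧ old ≠ [] then
      new ++ pvRep old new (List.drop old.length (c :: t))
    else c :: pvRep old new t
  termination_by s => s.length
  decreasing_by
    · have hpos : 0 < old.length := List.length_pos_of_ne_nil h.2
      simp [List.length_drop]
      omega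
    · simp

theorem pvGo_spec (old new : List Char) (hne : old ≠ []) :
    ∀ (fuel : Nat) (l acc : List Char), l.length ≤ fuel →
      PySem.Chars.replace.go old new fuel l acc = acc.reverse ++ pvRep old new l := by
  intro fuel
  induction fuel with
  | zero =>
    intro l acc hl
    have : l = [] := by cases l <;> simp_all
    subst this
    simp [PySem.Chars.replace.go, pvRep]
  | succ n ih =>
    intro l acc hl
    cases l with
    | nil => simp [PySem.Chars.replace.go, pvRep]
    | cons c t =>
      rw [PySem.Chars.replace.go]
      by_cases hp : old.isPrefixOf (c :: t)
      · rw [if_pos hp]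
        rw [ih _ _ (by
          have h1 : 0 < old.length := List.length_pos_of_ne_nil hne
          have h2 : t.length + 1 ≤ n + 1 := by simpa using hl
          simp [List.length_drop]; omega)]
        rw [pvRep]
        rw [dif_pos ⟨hp, hne⟩]
        simp
      · rw [if_neg hp]
        rw [ih _ _ (by simp at hl ⊢; omega)]
        rw [pvRep, dif_neg (by simp [hp])]
        simp

theorem pvReplace_eq_pvRep (old new s : List Char) (hne : old ≠ []) :
    PySem.Chars.replace s old new = pvRep old new s := by
  rw [PySem.Chars.replace]
  rw [if_neg (by simp [hne])]
  simpa using pvGo_spec old new hne s.length s [] le_rfl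

theorem pvRep_cons_nomatch (old new : List Char) (c : Char) (t : List Char)
    (h : ¬ old <+: (c :: t)) : pvRep old new (c :: t) = c :: pvRep old new t := by
  rw [pvRep, dif_neg]
  simp [List.isPrefixOf_iff_prefix]
  intro hp
  exact absurd hp h

theorem pvRep_append_match (old new X : List Char) (hne : old ≠ []) :
    pvRep old new (old ++ X) = new ++ pvRep old new X := by
  cases ho : old with
  | nil => exact absurd ho hne
  | cons a as =>
    rw [← ho]
    have hsh : old ++ X = a :: (as ++ X) := by rw [ho]; simp
    rw [hsh, pvRep, dif_pos (by rw [← hsh]; exact ⟨by simp [List.isPrefixOf_iff_prefix], hne⟩)]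
    rw [← hsh, List.drop_left]

theorem pvRep_skip_nopct (old new : List Char) (hold : old.head? = some '%')
    (w : List Char) (hw : ∀ c ∈ w, c ≠ '%') (X : List Char) :
    pvRep old new (w ++ X) = w ++ pvRep old new X := by
  induction w with
  | nil => simp
  | cons c w' ih =>
    have hc : c ≠ '%' := hw c (by simp)
    obtain ⟨o', ho⟩ : ∃ o', old = '%' :: o' := by
      cases old with
      | nil => simp at hold
      | cons a as => simp at hold; exact ⟨as, by rw [hold]⟩
    have : ¬ old <+: (c :: (w' ++ X)) := by
      rw [ho]
      intro hp
      rw [List.cons_prefix_cons] at hp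
      exact hc hp.1.symm
    rw [List.cons_append, pvRep_cons_nomatch _ _ _ _ this, ih (fun x hx => hw x (by simp [hx]))]
    simp

theorem pvRep_prefAgree (old new : List Char) (hnew : new.head? = some '{') :
    ∀ (s w : List Char), (∀ c ∈ w, c ≠ '{') → w <+: pvRep old new s → w <+: s := by
  intro s
  induction s with
  | nil => intro w hw; simp [pvRep]
  | cons c t ih =>
    intro w hw h
    rw [pvRep] at h
    split at h
    · -- matched: pvRep = new ++ …, new starts with '{'
      cases w with
      | nil => simp
      | cons a w' =>
        exfalso
        obtain ⟨n', hn⟩ : ∃ n', new = '{' :: n' := by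
          cases new with
          | nil => simp at hnew
          | cons b bs => simp at hnew; exact ⟨bs, by rw [hnew]⟩
        rw [hn] at h
        rw [List.cons_append, List.cons_prefix_cons] at h
        exact hw a (by simp) h.1
    · cases w with
      | nil => simp
      | cons a w' =>
        rw [List.cons_prefix_cons] at h
        obtain ⟨rfl, h2⟩ := h
        exact List.cons_prefix_cons.mpr ⟨rfl, ih w' (fun x hx => hw x (by simp [hx])) h2⟩

-- the table's shape facts, as one Bool check
def pvGoodB (p : List Char × List Char) : Bool :=
  !p.1.isEmpty && p.1.head? == some '%' && p.1.tail.all (· != '%') &&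
  p.1.all (· != '{') && p.2.head? == some '{' && p.2.all (· != '%')

theorem pvGood_props {p : List Char × List Char} (h : pvGoodB p = true) :
    p.1 ≠ [] ∧ p.1.head? = some '%' ∧ (∀ c ∈ p.1.tail, c ≠ '%') ∧
    (∀ c ∈ p.1, c ≠ '{') ∧ p.2.head? = some '{' ∧ (∀ c ∈ p.2, c ≠ '%') := by
  simp only [pvGoodB, Bool.and_eq_true] at h
  obtain ⟨⟨⟨⟨⟨h1, h2⟩, h3⟩, h4⟩, h5⟩, h6⟩ := h
  exact ⟨by simpa using h1, by simpa using h2, by simpa using h3,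
    by simpa using h4, by simpa using h5, by simpa using h6⟩

def pvRepF (s : List Char) (p : List Char × List Char) : List Char := pvRep p.1 p.2 s

theorem pvFold_nil (T : List (List Char × List Char)) :
    List.foldl pvRepF [] T = [] := by
  induction T with
  | nil => rfl
  | cons p T ih => simpa [pvRepF, pvRep] using ih

theorem pv_not_prefix_append_indep {p k r r' : List Char}
    (hnp : k <+: p → p = k) (h : ¬ p <+: k ++ r) : ¬ p <+: k ++ r' := by
  intro hp
  rcases List.prefix_or_prefix_of_prefix hp (List.prefix_append k r') with h1 | h2
  · exact h (h1.trans (List.prefix_append k r))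
  · exact h ((hnp h2) ▸ List.prefix_append k r)

theorem pvFold_cons_nomatch (c : Char) :
    ∀ (T : List (List Char × List Char)), (∀ p ∈ T, pvGoodB p = true) →
    ∀ t : List Char, (∀ p ∈ T, ¬ p.1 <+: (c :: t)) →
      List.foldl pvRepF (c :: t) T = c :: List.foldl pvRepF t T := by
  intro T
  induction T with
  | nil => intro _ t _; rfl
  | cons p T ih =>
    intro hg t h
    have hp : ¬ p.1 <+: (c :: t) := h p (by simp)
    have hgp : pvGoodB p = true := hg p (by simp)
    have hstep : pvRepF (c :: t) p = c :: pvRep p.1 p.2 t := pvRep_cons_nomatch _ _ _ _ hp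
    simp only [List.foldl_cons, hstep]
    refine ih (fun q hq => hg q (by simp [hq])) (pvRep p.1 p.2 t) ?_
    intro q hq hcontra
    have hgq : pvGoodB q = true := hg q (by simp [hq])
    obtain ⟨w, hqw⟩ : ∃ w, q.1 = '%' :: w := by
      have hh := (pvGood_props hgq).2.1
      cases hq1 : q.1 with
      | nil => simp [hq1] at hh
      | cons a as => rw [hq1] at hh; simp at hh; exact ⟨as, by rw [hh]⟩
    by_cases hc : c = '%'
    · subst hc
      rw [hqw, List.cons_prefix_cons] at hcontra
      have hw' : w <+: pvRep p.1 p.2 t := hcontra.2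
      have hwfree : ∀ x ∈ w, x ≠ '{' := fun x hx => (pvGood_props hgq).2.2.2.1 x (by simp [hqw, hx])
      have : w <+: t := pvRep_prefAgree p.1 p.2 (pvGood_props hgp).2.2.2.2.1 t w hwfree hw'
      exact h q (by simp [hq]) (by rw [hqw]; exact List.cons_prefix_cons.mpr ⟨rfl, this⟩)
    · rw [hqw, List.cons_prefix_cons] at hcontra
      exact hc hcontra.1.symm

theorem pvFold_skip_nopct :
    ∀ (T : List (List Char × List Char)), (∀ p ∈ T, pvGoodB p = true) →
    ∀ (v : List Char), (∀ c ∈ v, c ≠ '%') →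
    ∀ Y : List Char, List.foldl pvRepF (v ++ Y) T = v ++ List.foldl pvRepF Y T := by
  intro T
  induction T with
  | nil => intro _ v _ Y; rfl
  | cons p T ih =>
    intro hg v hv Y
    have hgp : pvGoodB p = true := hg p (by simp)
    simp only [List.foldl_cons]
    have hstep : pvRepF (v ++ Y) p = v ++ pvRep p.1 p.2 Y :=
      pvRep_skip_nopct p.1 p.2 (pvGood_props hgp).2.1 v hv Y
    rw [hstep]
    exact ih (fun q hq => hg q (by simp [hq])) v hv _

theorem pvFold_skip_keypref (k : List Char) (hk : k.head? = some '%')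
    (hkt : ∀ c ∈ k.tail, c ≠ '%') :
    ∀ (T : List (List Char × List Char)), (∀ p ∈ T, pvGoodB p = true) →
    (∀ p ∈ T, ∀ r', ¬ p.1 <+: k ++ r') →
    ∀ r : List Char, List.foldl pvRepF (k ++ r) T = k ++ List.foldl pvRepF r T := by
  obtain ⟨w, hkw⟩ : ∃ w, k = '%' :: w := by
    cases k with
    | nil => simp at hk
    | cons a as => simp at hk; exact ⟨as, by rw [hk]⟩
  intro T
  induction T with
  | nil => intro _ _ r; rfl
  | cons p T ih =>
    intro hg hnp r
    have hgp : pvGoodB p = true := hg p (by simp)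
    simp only [List.foldl_cons]
    have hw : ∀ c ∈ w, c ≠ '%' := by
      intro x hx; exact hkt x (by simp [hkw, hx])
    have h1 : pvRepF (k ++ r) p = k ++ pvRep p.1 p.2 r := by
      have hshape : k ++ r = '%' :: (w ++ r) := by rw [hkw]; simp
      have hnm : ¬ p.1 <+: ('%' :: (w ++ r)) := by rw [← hshape]; exact hnp p (by simp) r
      show pvRep p.1 p.2 (k ++ r) = _
      rw [hshape, pvRep_cons_nomatch _ _ _ _ hnm, pvRep_skip_nopct p.1 p.2 (pvGood_props hgp).2.1 w hw r, hkw]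
      simp
    rw [h1]
    exact ih (fun q hq => hg q (by simp [hq])) (fun q hq => hnp q (by simp [hq])) _

theorem pvGood : ∀ p ∈ pvTable, pvGoodB p = true := by decide

theorem pvNoPrefB :
    pvTable.all (fun p => pvTable.all (fun q => !(p.1.isPrefixOf q.1) || p.1 == q.1)) = true := by
  decide

theorem pvNoPref : ∀ p ∈ pvTable, ∀ q ∈ pvTable, p.1 <+: q.1 → p.1 = q.1 := by
  have h := pvNoPrefB
  simp only [List.all_eq_true] at h
  intro p hp q hq hpre
  have h2 := h p hp q hq
  rw [← List.isPrefixOf_iff_prefix] at hpre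
  simpa [hpre] using h2

theorem pvChainEq : ∀ s : List Char, List.foldl pvRepF s pvTable = pvScan s := by
  intro s
  induction s using pvScan.induct with
  | case1 => rw [pvScan]; exact pvFold_nil _
  | case2 c t p h ih =>
    -- p is the first matching table entry at this position
    have hmem : p ∈ pvTable := List.mem_of_find?_eq_some h
    have hgp : pvGoodB p = true := pvGood p hmem
    obtain ⟨hpred, T1, T2, htab, hT1⟩ := List.find?_eq_some_iff_append.mp h
    have hpre : p.1 <+: (c :: t) := by simpa [List.isPrefixOf_iff_prefix] using hpred
    obtain ⟨u, hu⟩ := hpre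
    have hdrop : List.drop p.1.length (c :: t) = u := by rw [← hu, List.drop_left]
    rw [hdrop] at ih
    rw [pvScan, h]
    show List.foldl pvRepF (c :: t) pvTable = p.2 ++ pvScan (List.drop p.1.length (c :: t))
    rw [hdrop]
    have hmemT : ∀ q ∈ T1, q ∈ pvTable := by
      intro q hq; rw [htab]; exact List.mem_append_left _ hq
    have hT1' : ∀ q ∈ T1, ∀ r', ¬ q.1 <+: p.1 ++ r' := by
      intro q hq r'
      have hnq : ¬ q.1 <+: (c :: t) := by
        have hb := hT1 q hq
        simp only [Bool.not_eq_true'] at hb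
        intro hpp
        rw [← List.isPrefixOf_iff_prefix] at hpp
        simp [hpp] at hb
      have hnq' : ¬ q.1 <+: p.1 ++ u := by rw [hu]; exact hnq
      exact pv_not_prefix_append_indep
        (fun hkq => (pvNoPref p hmem q (hmemT q hq) hkq).symm) hnq'
    calc List.foldl pvRepF (c :: t) pvTable
        = List.foldl pvRepF (p.1 ++ u) (T1 ++ p :: T2) := by rw [hu, htab]
      _ = List.foldl pvRepF (pvRepF (List.foldl pvRepF (p.1 ++ u) T1) p) T2 := by
            rw [List.foldl_append, List.foldl_cons]
      _ = List.foldl pvRepF (pvRepF (p.1 ++ List.foldl pvRepF u T1) p) T2 := by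
            rw [pvFold_skip_keypref p.1 (pvGood_props hgp).2.1 ((pvGood_props hgp).2.2.1) T1
              (fun q hq => pvGood q (hmemT q hq)) hT1' u]
      _ = List.foldl pvRepF (p.2 ++ pvRep p.1 p.2 (List.foldl pvRepF u T1)) T2 := by
            show List.foldl pvRepF (pvRep p.1 p.2 _) T2 = _
            rw [pvRep_append_match p.1 p.2 _ (pvGood_props hgp).1]
      _ = p.2 ++ List.foldl pvRepF (pvRep p.1 p.2 (List.foldl pvRepF u T1)) T2 := by
            rw [pvFold_skip_nopct T2
              (fun q hq => pvGood q (by rw [htab]; exact List.mem_append_right _ (by simp [hq])))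
              p.2 ((pvGood_props hgp).2.2.2.2.2) _]
      _ = p.2 ++ List.foldl pvRepF u pvTable := by
            rw [htab, List.foldl_append, List.foldl_cons]; rfl
      _ = p.2 ++ pvScan u := by rw [ih]
  | case3 c t h ih =>
    rw [pvScan, h]
    show List.foldl pvRepF (c :: t) pvTable = c :: pvScan t
    have hnone := List.find?_eq_none.mp h
    rw [pvFold_cons_nomatch c pvTable pvGood t
      (fun q hq => by simpa [List.isPrefixOf_iff_prefix] using hnone q hq), ih]

theorem pvScan_nopct : ∀ s : List Char, (∀ c ∈ s, c ≠ '%') → pvScan s = s := by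
  intro s
  induction s using pvScan.induct with
  | case1 => intro _; rw [pvScan]
  | case2 c t p h ih =>
    intro hs
    exfalso
    have hmem : p ∈ pvTable := List.mem_of_find?_eq_some h
    have hgp : pvGoodB p = true := pvGood p hmem
    have hpre : p.1 <+: (c :: t) := by
      simpa [List.isPrefixOf_iff_prefix] using List.find?_some h
    obtain ⟨w, hpw⟩ : ∃ w, p.1 = '%' :: w := by
      have hh := (pvGood_props hgp).2.1
      cases hp1 : p.1 with
      | nil => simp [hp1] at hh
      | cons a as => rw [hp1] at hh; simp at hh; exact ⟨as, by rw [hh]⟩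
    rw [hpw, List.cons_prefix_cons] at hpre
    exact hs c (by simp) hpre.1.symm
  | case3 c t h ih =>
    intro hs
    rw [pvScan, h]
    show c :: pvScan t = c :: t
    rw [ih (fun x hx => hs x (by simp [hx]))]

theorem pvScan_eq_scan_of_nopct (s : String) (h : PySem.Str.isIn "%" s = false) :
    pvScan s.toList = s.toList := by
  have h2 : ¬ (['%'] <:+: s.toList) := by
    have hb : PySem.Chars.isIn ['%'] s.toList = false := h
    exact (PySem.Chars.isIn_eq_false_iff _ _).mp hb
  refine pvScan_nopct s.toList ?_
  intro c hc rfl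
  exact h2 (by simpa [List.singleton_infix_iff] using hc)

theorem pvStrFold (l : List (String × String)) (f : String) :
    (l.foldl (fun a p => PySem.Str.replace a p.1 p.2) f).toList
      = (l.map (fun p => (p.1.toList, p.2.toList))).foldl
          (fun s q => PySem.Chars.replace s q.1 q.2) f.toList := by
  induction l generalizing f with
  | nil => rfl
  | cons p l ih => simp [ih, PySem.Str.toList_replace]

theorem pvItemsToList :
    pvReplacements.items.map (fun p => (p.1.toList, p.2.toList)) = pvTable := by decide

-- ===== VERDICT (by name: the statement is the Claim_ definition above) =====
theorem get_log_format_py_spec : Claim_equal_get_log_format_py := by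
  intro fmt _
  unfold Spec_get_log_format_py get_log_format_py get_log_format_py_alt
  by_cases hfmt : fmt = ""
  · simp [hfmt, pvLoguruDefault, pvDefaultB]
  · rw [if_neg hfmt, if_neg hfmt]
    by_cases hpct : PySem.Str.isIn "%" fmt = true
    · rw [if_pos hpct]
      apply String.toList_inj.mp
      rw [pvStrFold, pvItemsToList,
        PySem.List.foldl_congr_mem pvTable _ pvRepF fmt.toList
          (fun acc x hx => pvReplace_eq_pvRep x.1 x.2 acc (pvGood_props (pvGood x hx)).1),
        pvChainEq]
      simp
    · rw [if_neg hpct]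
      rw [pvScan_eq_scan_of_nopct fmt (by simpa using hpct)]
      simp
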